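-- pv_equiv track=rewrite | github.com/edumgt/Python-AI_Agent-Class | ragPipeline/class478/class478_solution.py | retrieve
-- ===== SOURCE A (Python) =====
-- def retrieve(query: str, chunks: list[str]) -> list[str]:
--     scored = []
--     q_tokens = set(query.split())
--     for chunk in chunks:
--         c_tokens = set(chunk.split())
--         score = len(q_tokens & c_tokens)
--         scored.append((score, chunk))
--     scored.sort(reverse=True, key=lambda x: x[0])
--     return [chunk for score, chunk in scored[:2] if score >= 0]
-- ===== SOURCE B (Python) =====
-- def retrieve(query: str, chunks: list[str]) -> list[str]:
--     q_tokens = set(query.split())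
--     best = None
--     second = None
--     for chunk in chunks:
--         s = len(q_tokens & set(chunk.split()))
--         if best is None or s > best[0]:
--             second = best
--             best = (s, chunk)
--         elif second is None or s > second[0]:
--             second = (s, chunk)
--     out = []
--     if best is not None:
--         out.append(best[1])
--     if second is not None:
--         out.append(second[1])
--     return out
-- ===== Notes on version B (the rewrite author's own statement) =====
-- stated objective: alternative
-- what changed: Replaces the full reverse stable sort followed by slicing with a single streaming pass that keeps only the current best and second-best (score, chunk), displacing entries only on strictly greater scores so stable tie order is preserved.
import Mathlib
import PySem

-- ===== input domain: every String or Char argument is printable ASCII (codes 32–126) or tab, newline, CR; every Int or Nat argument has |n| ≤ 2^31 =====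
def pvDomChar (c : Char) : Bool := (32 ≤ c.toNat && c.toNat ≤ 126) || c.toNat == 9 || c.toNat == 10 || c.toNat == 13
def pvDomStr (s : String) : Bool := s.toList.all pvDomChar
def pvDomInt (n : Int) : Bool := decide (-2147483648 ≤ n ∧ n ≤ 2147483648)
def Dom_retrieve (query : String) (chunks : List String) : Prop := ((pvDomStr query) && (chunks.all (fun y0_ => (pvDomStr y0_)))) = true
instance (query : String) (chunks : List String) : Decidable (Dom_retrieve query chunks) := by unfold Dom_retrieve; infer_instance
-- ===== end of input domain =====

-- B replaces A's full reverse stable sort + slice by a single pass keeping best and second-best; equivalence of return values proved on all inputs.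


-- ===== PORT A =====
def retrieve (query : String) (chunks : List String) : List String :=
  let q_tokens := PySem.Set.ofList (PySem.Str.split₀ query)
  let scored := chunks.foldl (fun acc chunk =>
    acc ++ [(PySem.Set.len (PySem.Set.inter q_tokens (PySem.Set.ofList (PySem.Str.split₀ chunk))), chunk)]) []
  let sorted := PySem.List.sorted scored (fun x => x.1) true
  ((PySem.List.slice sorted none (some 2)).filter (fun p => decide (p.1 ≥ 0))).map (fun p => p.2)

-- ===== PORT B =====
-- one loop step of B: update (best, second) with the scored chunk (s, chunk)
def retrieveAltStep (st : Option (Int × String) × Option (Int × String)) (s : Int) (chunk : String) :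
    Option (Int × String) × Option (Int × String) :=
  match st with
  | (none, _) => (some (s, chunk), none)
  | (some b, sec) =>
    if s > b.1 then (some (s, chunk), some b)
    else
      match sec with
      | none => (some b, some (s, chunk))
      | some c => if s > c.1 then (some b, some (s, chunk)) else (some b, some c)

def retrieve_alt (query : String) (chunks : List String) : List String :=
  let q_tokens := PySem.Set.ofList (PySem.Str.split₀ query)
  let st := chunks.foldl (fun st chunk =>
    retrieveAltStep st (PySem.Set.len (PySem.Set.inter q_tokens (PySem.Set.ofList (PySem.Str.split₀ chunk)))) chunk)
    (none, none)
  (match st.1 with | some b => [b.2] | none => []) ++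
  (match st.2 with | some c => [c.2] | none => [])

-- ===== PRECONDITION & SPEC =====
def Spec_retrieve (query : String) (chunks : List String) (out : List String) : Prop := out = retrieve_alt query chunks
instance (query : String) (chunks : List String) (out : List String) : Decidable (Spec_retrieve query chunks out) := by unfold Spec_retrieve; infer_instance

-- ===== CLAIM (what is proved, stated in full; the proofs are below) =====
def Claim_equal_retrieve : Prop := ∀ (query : String) (chunks : List String), Dom_retrieve query chunks → Spec_retrieve query chunks (retrieve query chunks)

-- ===== LEMMAS AND PROOFS =====

-- the score of a chunk against the query's token set (shared shape of both ports)
def pvScore (q : PySem.Set String) (c : String) : Int :=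
  PySem.Set.len (PySem.Set.inter q (PySem.Set.ofList (PySem.Str.split₀ c)))

-- the first two entries of a list, as B's (best, second) state
def pvPack (l : List (Int × String)) : Option (Int × String) × Option (Int × String) :=
  (l[0]?, l[1]?)

-- one step of the stable descending insertion sort (the `before` of sorted … true)
def pvIns (x : Int × String) (acc : List (Int × String)) : List (Int × String) :=
  PySem.List.insertBy (fun a b => decide (b.1 < a.1)) x acc

lemma pvStep_pack (acc : List (Int × String)) (x : Int × String) :
    retrieveAltStep (pvPack acc) x.1 x.2 = pvPack (pvIns x acc) := by
  obtain ⟨s, c⟩ := x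
  match acc with
  | [] => rfl
  | [a] =>
    simp only [pvPack, pvIns, PySem.List.insertBy, retrieveAltStep]
    by_cases h : a.1 < s
    · simp [h, gt_iff_lt]
    · simp [h, gt_iff_lt]
  | a :: b :: t =>
    simp only [pvPack, pvIns, PySem.List.insertBy, retrieveAltStep]
    by_cases h1 : a.1 < s
    · simp [h1, gt_iff_lt]
    · by_cases h2 : b.1 < s
      · simp [h1, h2, gt_iff_lt]
      · simp [h1, h2, gt_iff_lt]

lemma pvFold_pack (σ : String → Int) :
    ∀ (l : List String) (acc : List (Int × String)),
      l.foldl (fun st c => retrieveAltStep st (σ c) c) (pvPack acc)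
        = pvPack (l.foldl (fun a c => pvIns (σ c, c) a) acc) := by
  intro l
  induction l with
  | nil => intro acc; rfl
  | cons c t ih =>
    intro acc
    simp only [List.foldl_cons]
    rw [pvStep_pack acc (σ c, c), ih (pvIns (σ c, c) acc)]

-- emitting the chunks of B's final state = take 2 then project
lemma pvUnpack (l : List (Int × String)) :
    ((match (pvPack l).1 with | some b => [b.2] | none => []) ++
     (match (pvPack l).2 with | some c => [c.2] | none => []))
      = (l.take 2).map (fun p => p.2) := by
  match l with
  | [] => rfl
  | [a] => rfl
  | a :: b :: t => rfl

-- every score A computes is a set size, hence ≥ 0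
lemma pvScore_nonneg (q : PySem.Set String) (c : String) : 0 ≤ pvScore q c := by
  simp [pvScore, PySem.Set.len]

-- ===== VERDICT (by name: the statement is the Claim_ definition above) =====
theorem retrieve_spec : Claim_equal_retrieve := by
  intro query chunks _
  unfold Spec_retrieve retrieve retrieve_alt
  simp only []
  set q := PySem.Set.ofList (PySem.Str.split₀ query) with hq
  have hsc : ∀ c, (q.inter (PySem.Set.ofList (PySem.Str.split₀ c))).len = pvScore q c := fun _ => rfl
  simp only [hsc]
  -- A's scoring loop builds the map
  rw [PySem.List.foldl_append_singleton_eq_map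
        (f := fun chunk => (pvScore q chunk, chunk)) (l := chunks) (acc := [])]
  simp only [List.nil_append]
  -- the reverse stable sort is the insertBy fold
  rw [PySem.List.sorted_rev_eq_foldl_insertBy]
  -- B's loop over chunks is the same insertBy fold, packed to its first two entries
  have hB :
      chunks.foldl (fun st chunk => retrieveAltStep st (pvScore q chunk) chunk) (none, none)
        = pvPack ((chunks.map (fun chunk => (pvScore q chunk, chunk))).foldl
            (fun acc x => PySem.List.insertBy (fun a b => decide (b.1 < a.1)) x acc) []) := by
    rw [List.foldl_map]
    have := pvFold_pack (σ := pvScore q) chunks []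
    simpa [pvPack, pvIns] using this
  set L := (chunks.map (fun chunk => (pvScore q chunk, chunk))).foldl
      (fun acc x => PySem.List.insertBy (fun a b => decide (b.1 < a.1)) x acc) [] with hL
  rw [hB]
  -- slice [:2] is take 2
  rw [PySem.List.slice_to L (by norm_num : (0:Int) ≤ 2)]
  norm_num
  simp only [show Int.toNat 2 = 2 from rfl]
  -- the filter keeps everything: all scores are ≥ 0
  have hfil : (L.take 2).filter (fun p => decide (0 ≤ p.1)) = L.take 2 := by
    apply List.filter_eq_self.mpr
    intro p hp
    have hmem : p ∈ L := List.mem_of_mem_take hp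
    have hmem' : p ∈ chunks.map (fun chunk => (pvScore q chunk, chunk)) := by
      have := PySem.List.mem_sorted (xs := chunks.map (fun chunk => (pvScore q chunk, chunk)))
        (key := fun x : Int × String => x.1) (rev := true) (x := p)
      rw [PySem.List.sorted_rev_eq_foldl_insertBy] at this
      exact this.mp (hL ▸ hmem)
    obtain ⟨c, _, hc⟩ := List.mem_map.mp hmem'
    have := pvScore_nonneg q c
    subst hc
    simpa using this
  rw [hfil, ← pvUnpack L]
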